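-- pv_equiv track=rewrite | github.com/dlwjdtn1112/MyCodingTestSpace | myspace_CodingTest/프로그래머스/Lv2/할인 행사.py | solution
-- ===== SOURCE A (Python) =====
-- from collections import Counter
--
-- def solution(want, number, discount):
--     target = dict(zip(want, number))
--     answer = 0
--
--     for i in range(len(discount) - 9):
--         window = discount[i:i+10]
--         count = Counter(window)
--
--         if all(count.get(item, 0) >= target[item] for item in target):
--             answer += 1
--
--     return answer
-- ===== SOURCE B (Python) =====
-- def solution(want, number, discount):
--     target = dict(zip(want, number))
--     n = len(discount)
--     # per-item prefix counts: prefs[w][j] = occurrences of w in discount[:j]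
--     prefs = {}
--     for w in target:
--         p = [0]
--         c = 0
--         for d in discount:
--             if d == w:
--                 c += 1
--             p.append(c)
--         prefs[w] = p
--     answer = 0
--     for i in range(n - 9):
--         if all(prefs[w][i + 10] - prefs[w][i] >= target[w] for w in target):
--             answer += 1
--     return answer
-- ===== Notes on version B (the rewrite author's own statement) =====
-- stated objective: alternative
-- what changed: Replaces the per-window Counter over each 10-element slice by per-item prefix-count arrays built once, so each window test is a constant-time prefix difference per wanted item instead of rebuilding a Counter.
import Mathlib
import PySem

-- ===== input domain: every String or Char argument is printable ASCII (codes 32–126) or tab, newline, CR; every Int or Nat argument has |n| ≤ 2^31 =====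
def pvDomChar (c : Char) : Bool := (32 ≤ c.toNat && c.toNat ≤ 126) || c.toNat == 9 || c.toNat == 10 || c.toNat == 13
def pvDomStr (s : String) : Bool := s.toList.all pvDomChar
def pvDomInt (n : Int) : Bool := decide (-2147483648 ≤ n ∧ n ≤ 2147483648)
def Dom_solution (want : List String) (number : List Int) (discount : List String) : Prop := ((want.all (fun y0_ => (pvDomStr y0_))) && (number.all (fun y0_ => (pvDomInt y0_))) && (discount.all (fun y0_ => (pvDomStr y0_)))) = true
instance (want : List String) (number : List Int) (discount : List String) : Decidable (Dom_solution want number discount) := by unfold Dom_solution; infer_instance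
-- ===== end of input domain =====

-- B replaces A's per-window Counter over each 10-element slice by per-item prefix-count
-- arrays built once; each window test becomes a prefix difference (objective: alternative).

-- ===== PORT A =====
-- target[item] is read only for item in target's keys, so the lookup never raises;
-- it is ported as getD (exact here since the key is present).
def solution (want : List String) (number : List Int) (discount : List String) : Int :=
  let target : PySem.Dict String Int := PySem.Dict.ofList (want.zip number)
  (PySem.List.pyRange 0 ((discount.length : Int) - 9) 1).foldl
    (fun answer i =>
      let window := PySem.List.slice discount (some i) (some (i + 10))
      let count := PySem.Dict.counter window
      if target.keys.all (fun item => count.getD item 0 ≥ target.getD item 0)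
      then answer + 1 else answer) 0

-- ===== PORT B =====
-- prefs[w][j] is indexed only at 0 ≤ j ≤ len(discount), in range for the length-(n+1)
-- prefix list, so the Python indexing never raises; ported as pyGetD with default 0.
def solution_alt (want : List String) (number : List Int) (discount : List String) : Int :=
  let target : PySem.Dict String Int := PySem.Dict.ofList (want.zip number)
  let n : Int := discount.length
  let prefs : PySem.Dict String (List Int) :=
    target.keys.foldl
      (fun pf w =>
        let cp := discount.foldl
          (fun (s : Int × List Int) d =>
            let c := if d == w then s.1 + 1 else s.1
            (c, s.2 ++ [c])) (0, [0])
        pf.insert w cp.2) PySem.Dict.empty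
  (PySem.List.pyRange 0 (n - 9) 1).foldl
    (fun answer i =>
      if target.keys.all (fun w =>
          PySem.List.pyGetD (prefs.getD w []) (i + 10) 0
            - PySem.List.pyGetD (prefs.getD w []) i 0 ≥ target.getD w 0)
      then answer + 1 else answer) 0

-- ===== PRECONDITION & SPEC =====
def Spec_solution (want : List String) (number : List Int) (discount : List String) (out : Int) : Prop := out = solution_alt want number discount
instance (want : List String) (number : List Int) (discount : List String) (out : Int) : Decidable (Spec_solution want number discount out) := by unfold Spec_solution; infer_instance

-- ===== CLAIM (what is proved, stated in full; the proofs are below) =====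
def Claim_equal_solution : Prop := ∀ (want : List String) (number : List Int) (discount : List String), Dom_solution want number discount → Spec_solution want number discount (solution want number discount)

-- ===== LEMMAS AND PROOFS =====

-- The inner fold of B builds the prefix-count list.
theorem pv_fold_prefix (w : String) (xs : List String) (c : Int) (acc : List Int) :
    (xs.foldl (fun (s : Int × List Int) d =>
        let c := if d == w then s.1 + 1 else s.1
        (c, s.2 ++ [c])) (c, acc)).2
      = acc ++ (List.range xs.length).map (fun j => c + ((xs.take (j+1)).count w : Int)) := by
  induction xs generalizing c acc with
  | nil => simp
  | cons d tl ih =>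
    simp only [List.foldl_cons, ih, List.length_cons, List.range_succ_eq_map, List.map_cons,
      List.map_map]
    by_cases h : d = w
    · simp [h, List.append_assoc, Function.comp]
      intro j _; ring
    · simp [h, beq_iff_eq, List.append_assoc, Function.comp]

theorem pv_pref_getD (w : String) (xs : List String) (j : Int) (h0 : 0 ≤ j)
    (hle : j ≤ (xs.length : Int)) :
    PySem.List.pyGetD
      ((xs.foldl (fun (s : Int × List Int) d =>
          let c := if d == w then s.1 + 1 else s.1
          (c, s.2 ++ [c])) ((0 : Int), [0])).2) j 0
      = ((xs.take j.toNat).count w : Int) := by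
  rw [pv_fold_prefix]
  obtain ⟨k, rfl⟩ : ∃ k : ℕ, j = (k : Int) := ⟨j.toNat, (Int.toNat_of_nonneg h0).symm⟩
  rw [PySem.List.pyGetD_natCast]
  cases k with
  | zero => simp
  | succ m =>
    have hm : m < xs.length := by exact_mod_cast (by omega : ((m : Int) + 1) ≤ (xs.length : Int))
    rw [List.getD_eq_getElem?_getD]
    simp [hm]

-- count additivity along a take split: count in take (i+10) = count in take i + count in window
theorem pv_count_split (w : String) (xs : List String) (a b : Nat) :
    (xs.take (a + b)).count w = (xs.take a).count w + (((xs.drop a).take b).count w) := by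
  rw [List.take_add, List.count_append]

theorem pv_all_congr_mem {α : Type} (l : List α) (f g : α → Bool)
    (h : ∀ x ∈ l, f x = g x) : l.all f = l.all g := by
  induction l with
  | nil => rfl
  | cons a tl ih =>
    simp only [List.all_cons, h a (List.mem_cons_self), ih (fun x hx => h x (List.mem_cons_of_mem a hx))]

theorem solution_eq_alt (want : List String) (number : List Int) (discount : List String) :
    solution want number discount = solution_alt want number discount := by
  unfold solution solution_alt
  set target := PySem.Dict.ofList (want.zip number) with htarget
  set pl : String → List Int := fun w =>
    (discount.foldl (fun (s : Int × List Int) d =>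
        let c := if d == w then s.1 + 1 else s.1
        (c, s.2 ++ [c])) ((0 : Int), [0])).2 with hpl
  have hknd : target.keys.Nodup := PySem.Dict.nodup_keys_ofList _
  have hfresh : ∀ a ∈ target.keys,
      (PySem.Dict.empty : PySem.Dict String (List Int)).contains ((fun w => w) a) = false :=
    fun a _ => PySem.Dict.contains_empty _
  have hitems : (target.keys.foldl (fun pf w => pf.insert w (pl w)) PySem.Dict.empty).items
      = PySem.Dict.empty.items ++ target.keys.map (fun w => (w, pl w)) := by
    simpa using PySem.Dict.items_foldl_insert_fresh target.keys (fun w => w) pl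
      PySem.Dict.empty hfresh (by simpa using hknd)
  have hndp : (target.keys.foldl (fun pf w => pf.insert w (pl w)) PySem.Dict.empty).keys.Nodup := by
    simpa using PySem.Dict.nodup_keys_foldl_insert (ν := List Int) target.keys
      (fun _ w => pl w) PySem.Dict.empty PySem.Dict.nodup_keys_empty
  have hpref_get : ∀ w ∈ target.keys,
      (target.keys.foldl (fun pf w => pf.insert w (pl w)) PySem.Dict.empty).getD w [] = pl w := by
    intro w hw
    refine PySem.Dict.getD_of_mem_items _ ?_ hndp []
    rw [hitems]
    exact List.mem_append_right _ (List.mem_map_of_mem hw)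
  apply PySem.List.foldl_congr_mem
  intro acc i hi
  rw [PySem.List.mem_pyRange_one] at hi
  obtain ⟨h0, hub⟩ := hi
  show (if (target.keys.all fun item =>
        decide ((PySem.Dict.counter (PySem.List.slice discount (some i) (some (i + 10)))).getD item 0
          ≥ target.getD item 0)) = true
      then acc + 1 else acc)
    = (if (target.keys.all fun w =>
        decide (PySem.List.pyGetD
              ((target.keys.foldl (fun pf w => pf.insert w (pl w)) PySem.Dict.empty).getD w []) (i + 10) 0
            - PySem.List.pyGetD
              ((target.keys.foldl (fun pf w => pf.insert w (pl w)) PySem.Dict.empty).getD w []) i 0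
          ≥ target.getD w 0)) = true
      then acc + 1 else acc)
  have h10 : (0 : Int) ≤ i + 10 := by omega
  have hle : i + 10 ≤ (discount.length : Int) := by omega
  have hc := pv_all_congr_mem target.keys
    (fun item =>
        decide ((PySem.Dict.counter (PySem.List.slice discount (some i) (some (i + 10)))).getD item 0
          ≥ target.getD item 0))
    (fun w =>
        decide (PySem.List.pyGetD
              ((target.keys.foldl (fun pf w => pf.insert w (pl w)) PySem.Dict.empty).getD w []) (i + 10) 0
            - PySem.List.pyGetD
              ((target.keys.foldl (fun pf w => pf.insert w (pl w)) PySem.Dict.empty).getD w []) i 0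
          ≥ target.getD w 0))
    (by
      intro w hw
      simp only [hpref_get w hw]
      have hA : (PySem.Dict.counter (PySem.List.slice discount (some i) (some (i + 10)))).getD w 0
          = (((discount.drop i.toNat).take 10).count w : Int) := by
        rw [PySem.Dict.getD_counter, PySem.List.slice_toNat discount h0 h10]
        have h : (i + 10).toNat - i.toNat = 10 := by omega
        rw [h]
      have hB : PySem.List.pyGetD (pl w) (i + 10) 0 - PySem.List.pyGetD (pl w) i 0
          = (((discount.drop i.toNat).take 10).count w : Int) := by
        rw [hpl]
        rw [pv_pref_getD w discount (i + 10) h10 hle,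
            pv_pref_getD w discount i h0 (by omega)]
        have ht : (i + 10).toNat = i.toNat + 10 := by omega
        rw [ht, pv_count_split w discount i.toNat 10]
        push_cast
        ring
      rw [hA, hB])
  rw [hc]

-- ===== VERDICT (by name: the statement is the Claim_ definition above) =====
theorem solution_spec : Claim_equal_solution := by
  intro want number discount _
  exact solution_eq_alt want number discount
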